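-- pv_equiv track=rewrite | github.com/hrand1005/leetcode | 0395-longest-substring-with-at-least-k-repeating-characters/0395-longest-substring-with-at-least-k-repeating-characters.py | valid_sub
-- ===== SOURCE A (Python) =====
-- def valid_sub(s: str, k: int) -> bool:
--     occurrences = {}
--     for i in range(len(s)):
--         occurrences[s[i]] = occurrences.get(s[i], 0) + 1
--     for v in occurrences.values():
--         if v < k:
--             return False
--     return True
-- ===== SOURCE B (Python) =====
-- def valid_sub(s: str, k: int) -> bool:
--     # Sort the characters, then scan: equal characters are contiguous after
--     # sorting, so each maximal run length is that character's total count.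
--     t = sorted(s)
--     run = 0
--     for i in range(len(t)):
--         run += 1
--         if i + 1 == len(t) or t[i + 1] != t[i]:
--             if run < k:
--                 return False
--             run = 0
--     return True
-- ===== Notes on version B (the rewrite author's own statement) =====
-- stated objective: alternative
-- what changed: Replaces A's single-pass frequency-dictionary build plus a value scan by sort-then-run-scan: sort the characters and check that every maximal run of equal characters (= that character's count, since sorting makes equal characters contiguous) has length at least k.
import Mathlib
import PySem

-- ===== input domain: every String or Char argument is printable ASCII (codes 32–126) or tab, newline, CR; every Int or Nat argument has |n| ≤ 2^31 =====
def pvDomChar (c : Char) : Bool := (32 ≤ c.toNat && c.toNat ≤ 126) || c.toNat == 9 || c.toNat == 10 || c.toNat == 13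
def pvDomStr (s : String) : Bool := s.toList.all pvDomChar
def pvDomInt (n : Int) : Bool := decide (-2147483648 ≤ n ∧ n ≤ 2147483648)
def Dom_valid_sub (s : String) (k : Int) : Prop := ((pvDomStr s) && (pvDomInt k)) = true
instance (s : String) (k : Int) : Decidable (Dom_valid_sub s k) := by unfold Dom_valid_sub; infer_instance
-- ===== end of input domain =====

-- B replaces A's frequency-dictionary build + value scan by sort-then-run-scan
-- (equal characters are contiguous after sorting, so each run length is that
-- character's count); objective: alternative algorithm, not faster.

-- ===== PORT A =====
-- occurrences[s[i]] = occurrences.get(s[i], 0) + 1 over i in range(len(s));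
-- s[i] ported as pyGetD (exact: i is always in range here), then the values loop.
def valid_sub (s : String) (k : Int) : Bool :=
  let occurrences : PySem.Dict Char Int :=
    (PySem.List.pyRange 0 (PySem.Str.len s) 1).foldl
      (fun d i =>
        d.insert (PySem.List.pyGetD s.toList i ' ')
          (d.getD (PySem.List.pyGetD s.toList i ' ') 0 + 1))
      PySem.Dict.empty
  occurrences.values.all (fun v => !(decide (v < k)))

-- ===== PORT B =====
-- Source B's for loop over t = sorted(s): run += 1; at a run boundary
-- (i+1 == len(t) or t[i+1] != t[i]) fail if run < k, else reset run.
-- Ported as structural recursion on the remaining suffix of t (state: run),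
-- t[i+1] != t[i] becomes the match on the tail.
def pvScan (k : Int) : List Char → Nat → Bool
  | [], _ => true
  | c :: rest, run =>
    if (match rest with | [] => true | d :: _ => d != c) then
      if ((run + 1 : Nat) : Int) < k then false else pvScan k rest 0
    else pvScan k rest (run + 1)

def valid_sub_alt (s : String) (k : Int) : Bool :=
  pvScan k (PySem.List.sorted s.toList (fun c => c) false) 0

-- ===== PRECONDITION & SPEC =====
def Spec_valid_sub (s : String) (k : Int) (out : Bool) : Prop := out = valid_sub_alt s k
instance (s : String) (k : Int) (out : Bool) : Decidable (Spec_valid_sub s k out) := by unfold Spec_valid_sub; infer_instance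

-- ===== CLAIM (what is proved, stated in full; the proofs are below) =====
def Claim_equal_valid_sub : Prop := ∀ (s : String) (k : Int), Dom_valid_sub s k → Spec_valid_sub s k (valid_sub s k)

-- ===== LEMMAS AND PROOFS =====

-- run-scan invariant on a sorted list: 'run' copies of the head were already
-- consumed, so the scan answers "every char of t occurs ≥ k times, crediting
-- the head with the extra run"
theorem pvScan_iff (k : Int) :
    ∀ (t : List Char), t.Pairwise (· ≤ ·) → ∀ (r : Nat),
      (pvScan k t r = true ↔
        ∀ d ∈ t, k ≤ (if t.head? = some d then (r : Int) else 0) + (t.count d : Int)) := by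
  intro t
  induction t with
  | nil => simp [pvScan]
  | cons c rest ih =>
    intro hp r
    have hp' := List.pairwise_cons.mp hp
    have ih' := ih hp'.2
    cases rest with
    | nil =>
      rw [pvScan, if_pos rfl]
      by_cases hk : ((r + 1 : Nat) : Int) < k
      · rw [if_pos hk]
        simp only [Bool.false_eq_true, false_iff]
        intro h
        have h2 := h c List.mem_cons_self
        simp only [List.head?_cons, List.count_singleton, beq_self_eq_true, if_true] at h2
        push_cast at hk h2
        omega
      · rw [if_neg hk]
        simp only [pvScan, true_iff]
        intro d hd
        rcases List.mem_singleton.mp hd with rfl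
        simp only [List.head?_cons, List.count_singleton, beq_self_eq_true, if_true]
        push_cast at hk ⊢
        omega
    | cons e rest2 =>
      by_cases hec : e = c
      · -- t[i+1] == t[i]: continue the run
        subst hec
        rw [pvScan]
        simp only [bne_self_eq_false, Bool.false_eq_true, if_false]
        rw [ih' (r + 1)]
        constructor
        · intro h d hd
          rcases List.mem_cons.mp hd with rfl | hd'
          · have := h d (List.mem_cons_self)
            simp only [List.head?_cons,
              List.count_cons_self, if_true] at this ⊢
            push_cast at this ⊢
            omega
          · have := h d hd'
            by_cases hdc : d = e
            · subst hdc
              simp only [List.head?_cons,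
                List.count_cons_self, if_true] at this ⊢
              push_cast at this ⊢
              omega
            · have hcc : (e :: e :: rest2).count d = (e :: rest2).count d := by
                simp [Ne.symm hdc]
              simp only [List.head?_cons, Option.some.injEq] at this ⊢
              rw [if_neg (fun h' => hdc h'.symm)] at this ⊢
              rw [hcc]
              exact this
        · intro h d hd
          have hd' : d ∈ e :: e :: rest2 := List.mem_cons_of_mem e hd
          have := h d hd'
          by_cases hdc : d = e
          · subst hdc
            simp only [List.head?_cons,
              List.count_cons_self, if_true] at this ⊢
            push_cast at this ⊢
            omega
          · have hcc : (e :: e :: rest2).count d = (e :: rest2).count d := by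
              simp [Ne.symm hdc]
            simp only [List.head?_cons, Option.some.injEq] at this ⊢
            rw [if_neg (fun h' => hdc h'.symm)] at this ⊢
            rw [hcc] at this
            exact this
      · -- t[i+1] != t[i]: run boundary; by sortedness c does not reappear
        have hc_notin : c ∉ e :: rest2 := by
          intro hc
          rcases List.mem_cons.mp hc with h1 | h1
          · exact hec h1.symm
          · have h2 : e ≤ c := (List.pairwise_cons.mp hp'.2).1 c h1
            have h3 : c ≤ e := hp'.1 e List.mem_cons_self
            exact hec (le_antisymm h2 h3)
        rw [pvScan, if_pos (show ((e != c) = true) from by simp [hec])]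
        have hcount1 : (c :: e :: rest2).count c = 1 := by
          rw [List.count_cons_self, List.count_eq_zero.mpr hc_notin]
        by_cases hk : ((r + 1 : Nat) : Int) < k
        · rw [if_pos hk]
          simp only [Bool.false_eq_true, false_iff]
          intro h
          have h2 := h c List.mem_cons_self
          rw [hcount1] at h2
          simp only [List.head?_cons] at h2
          push_cast at hk h2
          omega
        · rw [if_neg hk, ih' 0]
          constructor
          · intro h d hd
            rcases List.mem_cons.mp hd with rfl | hd'
            · rw [hcount1]
              simp only [List.head?_cons]
              push_cast at hk ⊢
              omega
            · have hdc : d ≠ c := fun h' => hc_notin (h' ▸ hd')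
              have hcc : (c :: e :: rest2).count d = (e :: rest2).count d := by
                simp [List.count_cons, Ne.symm hdc]
              have h2 := h d hd'
              have h3 : k ≤ (0 : Int) + ((e :: rest2).count d : Int) := by
                split at h2 <;> simpa using h2
              simp only [List.head?_cons, Option.some.injEq]
              rw [if_neg (fun h' => hdc h'.symm), hcc]
              exact h3
          · intro h d hd
            have h2 := h d (List.mem_cons_of_mem c hd)
            have hdc : d ≠ c := fun h' => hc_notin (h' ▸ hd)
            have hcc : (c :: e :: rest2).count d = (e :: rest2).count d := by
              simp [List.count_cons, Ne.symm hdc]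
            rw [hcc] at h2
            simp only [List.head?_cons, Option.some.injEq] at h2
            rw [if_neg (fun h' => hdc h'.symm)] at h2
            split <;> simpa using h2

theorem valid_sub_eq (s : String) (k : Int) : valid_sub s k = valid_sub_alt s k := by
  unfold valid_sub valid_sub_alt
  rw [show (PySem.List.pyRange 0 (PySem.Str.len s) 1).foldl
        (fun (d : PySem.Dict Char Int) i =>
          d.insert (PySem.List.pyGetD s.toList i ' ')
            (d.getD (PySem.List.pyGetD s.toList i ' ') 0 + 1))
        PySem.Dict.empty
      = (s.toList.drop (0 : Int).toNat).foldl
          (fun (d : PySem.Dict Char Int) c => d.insert c (d.getD c 0 + 1))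
          PySem.Dict.empty
    from PySem.List.foldl_pyRange_pyGetD' (xs := s.toList)
        (f := fun (d : PySem.Dict Char Int) c => d.insert c (d.getD c 0 + 1))
        (d := ' ') (init := PySem.Dict.empty) (le_refl 0)]
  simp only [Int.toNat_zero, List.drop_zero]
  rw [PySem.Dict.foldl_insert_getD_add_one_eq_counter,
      PySem.Dict.values_eq_map_keys _ (PySem.Dict.nodup_keys_counter s.toList) 0,
      PySem.Dict.keys_counter]
  have hperm : (PySem.List.sorted s.toList (fun c => c) false).Perm s.toList :=
    PySem.List.sorted_perm s.toList (fun c => c) false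
  have hpw : (PySem.List.sorted s.toList (fun c => c) false).Pairwise (· ≤ ·) :=
    PySem.List.sorted_pairwise s.toList (fun c => c)
  have hB : pvScan k (PySem.List.sorted s.toList (fun c => c) false) 0
      = decide (∀ c ∈ s.toList, k ≤ (s.toList.count c : Int)) := by
    have h1 := pvScan_iff k _ hpw 0
    have h2 : (∀ d ∈ PySem.List.sorted s.toList (fun c => c) false,
        k ≤ (if (PySem.List.sorted s.toList (fun c => c) false).head? = some d then ((0 : Nat) : Int) else 0)
          + ((PySem.List.sorted s.toList (fun c => c) false).count d : Int))
        ↔ (∀ c ∈ s.toList, k ≤ (s.toList.count c : Int)) := by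
      constructor <;> intro h c hc
      · have := h c (hperm.mem_iff.mpr hc)
        rw [hperm.count_eq] at this
        split at this <;> simpa using this
      · have := h c (hperm.mem_iff.mp hc)
        rw [hperm.count_eq]
        split <;> simpa using this
    rw [Bool.eq_iff_iff]
    simp only [decide_eq_true_eq]
    exact h1.trans h2
  rw [hB, Bool.eq_iff_iff]
  simp [PySem.Dict.getD_counter, List.all_map, Function.comp_def, PySem.Set.mem_ofList]

-- ===== VERDICT (by name: the statement is the Claim_ definition above) =====
theorem valid_sub_spec : Claim_equal_valid_sub := by
  intro s k _
  exact valid_sub_eq s k
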